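-- pv_equiv track=rewrite | github.com/thallada/nlp | syntax_aware_generate.py | get_most_common
-- ===== SOURCE A (Python) =====
-- import operator
--
-- def get_most_common(search, cfds, most_common=None):
--     if not most_common:
--         most_common = list()
--     words = search.split(' ')
--     for i in reversed(range(len(cfds))):
--         n = i + 2
--         if len(words) >= (n - 1):
--             query = ' '.join(words[len(words) - (n - 1):])
--             if query in cfds[i]:
--                 most_common.extend([entry[0] for entry in sorted(cfds[i][query].items(),
--                                                                  key=operator.itemgetter(1),
--                                                                  reverse=True)
--                                     if entry[0] not in most_common])
--     return most_common
-- ===== SOURCE B (Python) =====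
-- import operator
--
-- def get_most_common(search, cfds, most_common=None):
--     if not most_common:
--         most_common = list()
--     words = search.split(' ')
--
--     def collect(levels, i):
--         # recursively gather candidates for levels[0:], deepest level first
--         if not levels:
--             return []
--         later = collect(levels[1:], i + 1)
--         here = []
--         if len(words) >= i + 1:
--             query = ' '.join(words[len(words) - (i + 1):])
--             dist = levels[0].get(query)
--             if dist is not None:
--                 here = [w for w, _ in sorted(dist.items(),
--                                              key=operator.itemgetter(1),
--                                              reverse=True)]
--         return later + here
--
--     seed = set(most_common)
--     most_common.extend(w for w in dict.fromkeys(collect(cfds, 0))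
--                        if w not in seed)
--     return most_common
-- ===== Notes on version B (the rewrite author's own statement) =====
-- stated objective: alternative
-- what changed: A is an indexed reversed-range loop that extends the result inside the loop, rescanning the growing result list for membership per candidate; B recurses on the cfds list structure to gather one flat candidate list (no index loop, no in-loop result mutation) and then deduplicates it in one staged pass via the dict.fromkeys first-occurrence idiom filtered against a seed set of the initial most_common.
import Mathlib
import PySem

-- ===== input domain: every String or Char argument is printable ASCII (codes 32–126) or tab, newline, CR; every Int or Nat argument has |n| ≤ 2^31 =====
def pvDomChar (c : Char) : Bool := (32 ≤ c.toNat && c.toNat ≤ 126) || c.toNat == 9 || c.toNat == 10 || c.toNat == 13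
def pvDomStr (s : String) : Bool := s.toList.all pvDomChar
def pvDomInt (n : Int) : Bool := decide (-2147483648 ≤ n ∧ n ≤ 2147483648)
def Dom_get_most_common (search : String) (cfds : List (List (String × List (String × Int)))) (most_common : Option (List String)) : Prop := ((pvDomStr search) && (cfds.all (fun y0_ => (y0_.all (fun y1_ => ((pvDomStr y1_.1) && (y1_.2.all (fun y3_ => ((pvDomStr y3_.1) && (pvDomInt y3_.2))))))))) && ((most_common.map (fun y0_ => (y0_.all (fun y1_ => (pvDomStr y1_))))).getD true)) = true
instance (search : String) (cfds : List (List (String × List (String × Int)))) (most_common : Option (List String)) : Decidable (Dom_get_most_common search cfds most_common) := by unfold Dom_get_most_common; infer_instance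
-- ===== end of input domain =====

-- B replaces A's indexed reversed-range loop that extends the result in place by a recursion over
-- the cfds list gathering one flat candidate list, then a staged dedup (dict.fromkeys seeded with a
-- set of most_common). Equivalence is about the RETURN value only: both Pythons mutate a non-empty
-- `most_common` argument in place.

-- ===== PORT A =====
def get_most_common (search : String) (cfds : List (List (String × List (String × Int)))) (most_common : Option (List String)) : List String :=
  -- `if not most_common: most_common = list()` — None and [] both become []
  let most_common := most_common.getD []
  let words := (PySem.Str.split? search " ").getD []
  ((PySem.List.pyRange 0 (cfds.length : Int) 1).reverse).foldl
    (fun mc i =>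
      let n := i + 2
      if ((words.length : Int)) ≥ n - 1 then
        let query := PySem.Str.join " " (PySem.List.slice words (some ((words.length : Int) - (n - 1))) none)
        let d := PySem.Dict.ofList (PySem.List.pyGetD cfds i [])
        if d.contains query then
          mc ++ ((PySem.List.sorted (PySem.Dict.ofList (d.getD query [])).items (fun e => e.2) true).filter
                   (fun e => !(mc.contains e.1))).map (fun e => e.1)
        else mc
      else mc)
    most_common

-- ===== PORT B =====
-- `collect(levels, i)`: structural recursion over the cfds list, deepest level's words first
def pvCollect (words : List String) : List (List (String × List (String × Int))) → Int → List String
  | [], _ => []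
  | lvl :: rest, i =>
      pvCollect words rest (i + 1) ++
      (if ((words.length : Int)) ≥ i + 1 then
        match (PySem.Dict.ofList lvl).get?
            (PySem.Str.join " " (PySem.List.slice words (some ((words.length : Int) - (i + 1))) none)) with
        | some dist => (PySem.List.sorted (PySem.Dict.ofList dist).items (fun e => e.2) true).map (fun e => e.1)
        | none => []
      else [])

def get_most_common_alt (search : String) (cfds : List (List (String × List (String × Int)))) (most_common : Option (List String)) : List String :=
  let most_common := most_common.getD []
  let words := (PySem.Str.split? search " ").getD []
  let seed := PySem.Set.ofList most_common
  -- dict.fromkeys-dedup of the recursively gathered candidates, filtered against the seed set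
  most_common ++ (PySem.List.dedup (pvCollect words cfds 0)).filter (fun w => !(PySem.Set.contains seed w))

-- ===== PRECONDITION & SPEC =====
def Spec_get_most_common (search : String) (cfds : List (List (String × List (String × Int)))) (most_common : Option (List String)) (out : List String) : Prop := out = get_most_common_alt search cfds most_common
instance (search : String) (cfds : List (List (String × List (String × Int)))) (most_common : Option (List String)) (out : List String) : Decidable (Spec_get_most_common search cfds most_common out) := by unfold Spec_get_most_common; infer_instance

-- ===== CLAIM (what is proved, stated in full; the proofs are below) =====
def Claim_equal_get_most_common : Prop := ∀ (search : String) (cfds : List (List (String × List (String × Int)))) (most_common : Option (List String)), Dom_get_most_common search cfds most_common → Spec_get_most_common search cfds most_common (get_most_common search cfds most_common)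

-- ===== LEMMAS AND PROOFS =====

-- membership in the set built from a list is list membership
theorem pv_set_contains_ofList (s : List String) (x : String) :
    PySem.Set.contains (PySem.Set.ofList s) x = s.contains x := by
  rw [Bool.eq_iff_iff]
  simp [PySem.Set.contains, PySem.Set.mem_ofList]

-- the word list of one level (sorted items of a dict, keys projected) has no duplicates
theorem pv_level_nodup (v : List (String × Int)) :
    (((PySem.List.sorted (PySem.Dict.ofList v).items (fun e => e.2) true).map (fun e => e.1)).Nodup) := by
  have hperm := (PySem.List.sorted_perm (PySem.Dict.ofList v).items (fun e => e.2) true).map (fun e : String × Int => e.1)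
  have hnd : ((PySem.Dict.ofList v).items.map (fun e => e.1)).Nodup := by
    simpa [PySem.Dict.keys] using PySem.Dict.nodup_keys_ofList (ν := Int) v
  exact hnd.perm hperm.symm

-- running the pair dedup fold over a duplicate-free chunk = A's filter-against-current-result extension
theorem pv_dedup_run (ws : List String) (h : ws.Nodup) : ∀ (mc : List String),
    ws.foldl (fun (st : PySem.Set String × List String) w =>
        if st.1.contains w then st else (st.1.add w, st.2 ++ [w]))
      (PySem.Set.ofList mc, mc)
    = (PySem.Set.ofList (mc ++ ws.filter (fun w => !(mc.contains w))),
       mc ++ ws.filter (fun w => !(mc.contains w))) := by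
  induction ws with
  | nil => intro mc; simp
  | cons w ws ih =>
    intro mc
    obtain ⟨hw, hnd⟩ := List.nodup_cons.mp h
    by_cases hc : mc.contains w = true
    · simp only [List.foldl_cons, List.filter_cons, hc, Bool.not_true,
        pv_set_contains_ofList]
      exact ih hnd mc
    · have hc' : mc.contains w = false := by simpa using hc
      simp only [List.foldl_cons, List.filter_cons, hc', Bool.not_false, if_pos,
        pv_set_contains_ofList, Bool.false_eq_true, reduceIte]
      rw [← PySem.Set.ofList_append_singleton]
      rw [ih hnd (mc ++ [w])]
      have hfilt : ws.filter (fun x => !((mc ++ [w]).contains x))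
          = ws.filter (fun x => !(mc.contains x)) := by
        apply List.filter_congr
        intro x hx
        have hxw : x ≠ w := fun hxe => hw (hxe ▸ hx)
        simp [hxw]
      rw [hfilt]
      simp

-- A's main loop, over an arbitrary index list, equals the pair dedup fold of the flat candidate list
theorem pv_loop (words : List String) (cfds : List (List (String × List (String × Int))))
    (is : List Int) : ∀ (mc : List String),
    (is.flatMap (fun i =>
        if ((words.length : Int)) ≥ i + 1 then
          let query := PySem.Str.join " " (PySem.List.slice words (some ((words.length : Int) - (i + 1))) none)
          match (PySem.Dict.ofList (PySem.List.pyGetD cfds i [])).get? query with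
          | some dist =>
              (PySem.List.sorted (PySem.Dict.ofList dist).items (fun e => e.2) true).map (fun e => e.1)
          | none => []
        else [])).foldl
      (fun (st : PySem.Set String × List String) w =>
        if st.1.contains w then st else (st.1.add w, st.2 ++ [w]))
      (PySem.Set.ofList mc, mc)
    = (PySem.Set.ofList (is.foldl (fun mc i =>
        let n := i + 2
        if ((words.length : Int)) ≥ n - 1 then
          let query := PySem.Str.join " " (PySem.List.slice words (some ((words.length : Int) - (n - 1))) none)
          let d := PySem.Dict.ofList (PySem.List.pyGetD cfds i [])
          if d.contains query then
            mc ++ ((PySem.List.sorted (PySem.Dict.ofList (d.getD query [])).items (fun e => e.2) true).filter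
                     (fun e => !(mc.contains e.1))).map (fun e => e.1)
          else mc
        else mc) mc),
       is.foldl (fun mc i =>
        let n := i + 2
        if ((words.length : Int)) ≥ n - 1 then
          let query := PySem.Str.join " " (PySem.List.slice words (some ((words.length : Int) - (n - 1))) none)
          let d := PySem.Dict.ofList (PySem.List.pyGetD cfds i [])
          if d.contains query then
            mc ++ ((PySem.List.sorted (PySem.Dict.ofList (d.getD query [])).items (fun e => e.2) true).filter
                     (fun e => !(mc.contains e.1))).map (fun e => e.1)
          else mc
        else mc) mc) := by
  induction is with
  | nil => intro mc; simp
  | cons i is ih =>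
    intro mc
    rw [List.flatMap_cons, List.foldl_append, List.foldl_cons]
    have harith : (i : Int) + 2 - 1 = i + 1 := by ring
    simp only [harith]
    by_cases hlen : ((words.length : Int)) ≥ i + 1
    · simp only [if_pos hlen]
      set q := PySem.Str.join " " (PySem.List.slice words (some ((words.length : Int) - (i + 1))) none) with hq
      set d := PySem.Dict.ofList (PySem.List.pyGetD cfds i []) with hd
      cases hg : d.get? q with
      | none =>
        have hcont : d.contains q = false := by rw [PySem.Dict.contains_eq_isSome_get?, hg]; rfl
        simp only [hcont, Bool.false_eq_true, reduceIte]
        exact ih mc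
      | some dist =>
        have hcont : d.contains q = true := by rw [PySem.Dict.contains_eq_isSome_get?, hg]; rfl
        have hgd : d.getD q [] = dist := by rw [PySem.Dict.getD, hg]; rfl
        simp only [hcont, if_pos, hgd]
        rw [pv_dedup_run _ (pv_level_nodup dist) mc]
        rw [List.filter_map (f := fun e : String × Int => e.1) (p := fun w => !(mc.contains w))]
        exact ih _
    · simp only [if_neg hlen]
      exact ih mc

-- the pair dedup fold equals B's staged form: dedup (first occurrences) filtered against the seed
theorem pv_pairfold_eq (cands : List String) : ∀ (p mc0 : List String),
    (cands.foldl (fun (st : PySem.Set String × List String) w =>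
        if st.1.contains w then st else (st.1.add w, st.2 ++ [w]))
      (PySem.Set.ofList (mc0 ++ p),
       mc0 ++ (PySem.Set.ofList p).filter (fun w => !(mc0.contains w)))).2
    = mc0 ++ (PySem.Set.ofList (p ++ cands)).filter (fun w => !(mc0.contains w)) := by
  induction cands with
  | nil => intro p mc0; simp
  | cons w cs ih =>
    intro p mc0
    rw [List.foldl_cons]
    by_cases hc : PySem.Set.contains (PySem.Set.ofList (mc0 ++ p)) w = true
    · simp only [hc, reduceIte]
      have hmem : w ∈ mc0 ++ p := (PySem.Set.mem_ofList _ _).mp (by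
        simpa [PySem.Set.contains] using hc)
      have hset : PySem.Set.ofList (mc0 ++ (p ++ [w])) = PySem.Set.ofList (mc0 ++ p) := by
        rw [← List.append_assoc, PySem.Set.ofList_append_singleton, PySem.Set.add]
        simp [PySem.Set.contains, PySem.Set.mem_ofList, hmem]
      have hout : mc0 ++ (PySem.Set.ofList (p ++ [w])).filter (fun x => !(mc0.contains x))
          = mc0 ++ (PySem.Set.ofList p).filter (fun x => !(mc0.contains x)) := by
        rw [PySem.Set.ofList_append_singleton, PySem.Set.add]
        by_cases hp : w ∈ PySem.Set.ofList p
        · simp [PySem.Set.contains, hp]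
        · have hm0 : w ∈ mc0 := by
            rcases List.mem_append.mp hmem with h | h
            · exact h
            · exact absurd ((PySem.Set.mem_ofList _ _).mpr h) hp
          simp [PySem.Set.contains, hp, List.filter_append, hm0]
      have := ih (p ++ [w]) mc0
      rw [hset, hout] at this
      rw [this]
      simp
    · have hc' : PySem.Set.contains (PySem.Set.ofList (mc0 ++ p)) w = false := by simpa using hc
      simp only [hc', Bool.false_eq_true, reduceIte]
      have hmem : w ∉ mc0 ++ p := fun h => by
        simp [PySem.Set.contains, PySem.Set.mem_ofList, h] at hc'
      have hm0 : w ∉ mc0 := fun h => hmem (List.mem_append.mpr (Or.inl h))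
      have hp : w ∉ PySem.Set.ofList p := fun h =>
        hmem (List.mem_append.mpr (Or.inr ((PySem.Set.mem_ofList _ _).mp h)))
      have hset : PySem.Set.add (PySem.Set.ofList (mc0 ++ p)) w
          = PySem.Set.ofList (mc0 ++ (p ++ [w])) := by
        rw [← List.append_assoc, PySem.Set.ofList_append_singleton]
      have hout : (mc0 ++ (PySem.Set.ofList p).filter (fun x => !(mc0.contains x))) ++ [w]
          = mc0 ++ (PySem.Set.ofList (p ++ [w])).filter (fun x => !(mc0.contains x)) := by
        rw [PySem.Set.ofList_append_singleton, PySem.Set.add]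
        have hpp : w ∉ p := fun h => hmem (List.mem_append.mpr (Or.inr h))
        have hcm0 : mc0.contains w = false := by simpa using hm0
        simp [hpp, hm0]
      rw [hset]
      have := ih (p ++ [w]) mc0
      rw [← hout] at this
      rw [this]
      simp

-- B's recursion equals the flat candidate list over the reversed Nat range
theorem pv_collect_eq (words : List String) :
    ∀ (levels : List (List (String × List (String × Int)))) (k : Nat),
    pvCollect words levels ((k : Nat) : Int)
    = ((List.range levels.length).reverse).flatMap (fun j =>
        if ((words.length : Int)) ≥ ((k + j : Nat) : Int) + 1 then
          match (PySem.Dict.ofList (levels.getD j [])).get?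
              (PySem.Str.join " " (PySem.List.slice words (some ((words.length : Int) - (((k + j : Nat) : Int)) - 1)) none)) with
          | some dist => (PySem.List.sorted (PySem.Dict.ofList dist).items (fun e => e.2) true).map (fun e => e.1)
          | none => []
        else []) := by
  intro levels
  induction levels with
  | nil => intro k; simp [pvCollect]
  | cons lvl rest ih =>
    intro k
    have hcast : ((k : Nat) : Int) + 1 = ((k + 1 : Nat) : Int) := by push_cast; ring
    rw [pvCollect, hcast, ih (k + 1)]
    rw [List.length_cons, List.range_succ_eq_map, List.reverse_cons, ← List.map_reverse,
      List.flatMap_append, List.flatMap_map]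
    congr 1
    · apply List.flatMap_congr
      intro j _
      have h1 : (k + 1 + j : Nat) = (k + (j + 1) : Nat) := by omega
      simp only [List.getD_cons_succ, Nat.succ_eq_add_one, h1]
    · have h0 : (k + 0 : Nat) = k := by omega
      simp only [List.flatMap_cons, List.flatMap_nil, List.append_nil, List.getD_cons_zero, h0]
      have e1 : ((k + 1 : Nat) : Int) = (k : Int) + 1 := by push_cast; ring
      rw [e1]
      have harith : (words.length : Int) - ((k : Int) + 1) = (words.length : Int) - (k : Int) - 1 := by ring
      rw [harith]

-- A's flat candidate list over the reversed Int range IS B's recursive gather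
theorem pv_cands_bridge (words : List String) (cfds : List (List (String × List (String × Int)))) :
    ((PySem.List.pyRange 0 (cfds.length : Int) 1).reverse).flatMap (fun i =>
        if ((words.length : Int)) ≥ i + 1 then
          let query := PySem.Str.join " " (PySem.List.slice words (some ((words.length : Int) - (i + 1))) none)
          match (PySem.Dict.ofList (PySem.List.pyGetD cfds i [])).get? query with
          | some dist =>
              (PySem.List.sorted (PySem.Dict.ofList dist).items (fun e => e.2) true).map (fun e => e.1)
          | none => []
        else [])
    = pvCollect words cfds 0 := by
  have h := pv_collect_eq words cfds 0
  simp only [Nat.cast_zero, zero_add] at h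
  rw [h, PySem.List.pyRange_zero_natCast, ← List.map_reverse, List.flatMap_map]
  apply List.flatMap_congr
  intro j _
  simp only [PySem.List.pyGetD_natCast]
  by_cases hlen : ((words.length : Int)) ≥ (j : Int) + 1
  · simp only [ge_iff_le, if_pos hlen]
    have harith : (words.length : Int) - ((j : Int) + 1) = (words.length : Int) - (j : Int) - 1 := by ring
    rw [harith]
  · simp only [ge_iff_le, if_neg hlen]

-- the assembled main equality, over the unfolded ports' bodies
theorem pv_main (words mc : List String) (cfds : List (List (String × List (String × Int)))) :
    ((PySem.List.pyRange 0 (cfds.length : Int) 1).reverse).foldl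
      (fun mc i =>
        let n := i + 2
        if ((words.length : Int)) ≥ n - 1 then
          let query := PySem.Str.join " " (PySem.List.slice words (some ((words.length : Int) - (n - 1))) none)
          let d := PySem.Dict.ofList (PySem.List.pyGetD cfds i [])
          if d.contains query then
            mc ++ ((PySem.List.sorted (PySem.Dict.ofList (d.getD query [])).items (fun e => e.2) true).filter
                     (fun e => !(mc.contains e.1))).map (fun e => e.1)
          else mc
        else mc)
      mc
    = mc ++ (PySem.Set.ofList (pvCollect words cfds 0)).filter (fun w => !(mc.contains w)) := by
  have hA := pv_loop words cfds ((PySem.List.pyRange 0 (cfds.length : Int) 1).reverse) mc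
  have hA2 := congrArg Prod.snd hA
  dsimp only [Prod.snd] at hA2
  rw [← hA2, pv_cands_bridge]
  have hB := pv_pairfold_eq (pvCollect words cfds 0) [] mc
  simp only [show PySem.Set.ofList ([] : List String) = [] from rfl, List.filter_nil,
    List.append_nil] at hB
  exact hB

-- ===== VERDICT (by name: the statement is the Claim_ definition above) =====
theorem get_most_common_spec : Claim_equal_get_most_common := by
  intro search cfds most_common _
  unfold Spec_get_most_common
  simp only [get_most_common, get_most_common_alt, PySem.List.dedup_eq_ofList,
    pv_set_contains_ofList]
  exact pv_main _ _ _
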